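-- pv_equiv track=rewrite | github.com/Ezgikorkutt/nl2ltl-demo | integrate_nl2ltl_zonopy.py | monitor_Precedence
-- ===== SOURCE A (Python) =====
-- def monitor_Precedence(A, B, trace):
--     seen_A = False
--     for i, t in enumerate(trace):
--         if B in t and not seen_A:
--             return False, {"violating_B_index": i}
--         if A in t:
--             seen_A = True
--     return True, {}
-- ===== SOURCE B (Python) =====
-- def monitor_Precedence(A, B, trace):
--     # index-comparison formulation: the precedence is violated exactly when the
--     # first element containing B is not strictly after the first element
--     # containing A (A's loop checks B before recording A in the same element).
--     iB = next((i for i, t in enumerate(trace) if B in t), None)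
--     if iB is None:
--         return True, {}
--     iA = next((i for i, t in enumerate(trace) if A in t), len(trace))
--     if iA < iB:
--         return True, {}
--     return False, {"violating_B_index": iB}
-- ===== Notes on version B (the rewrite author's own statement) =====
-- stated objective: alternative
-- what changed: Replaces the stateful seen_A scan by an index-comparison formulation: compute the first index containing B and the first index containing A, and report a violation iff the B index is not strictly after the A index.
import Mathlib
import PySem

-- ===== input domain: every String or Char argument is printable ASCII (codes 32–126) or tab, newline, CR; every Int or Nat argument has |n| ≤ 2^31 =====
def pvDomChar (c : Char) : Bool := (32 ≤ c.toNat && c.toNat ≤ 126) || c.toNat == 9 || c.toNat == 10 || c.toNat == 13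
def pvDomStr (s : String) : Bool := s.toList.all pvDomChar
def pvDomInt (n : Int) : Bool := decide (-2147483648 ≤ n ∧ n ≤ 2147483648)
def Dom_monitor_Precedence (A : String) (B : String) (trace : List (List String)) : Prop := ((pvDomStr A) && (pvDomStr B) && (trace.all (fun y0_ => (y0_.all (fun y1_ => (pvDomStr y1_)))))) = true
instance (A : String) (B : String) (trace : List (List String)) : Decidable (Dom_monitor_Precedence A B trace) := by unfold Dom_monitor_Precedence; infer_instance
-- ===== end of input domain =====

-- B decides the result by comparing the first-B and first-A indices instead of scanning with a seen_A flag; same return value as A everywhere.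

-- ===== PORT A =====
-- A's single loop carrying the seen_A flag and the enumerate index.
def mpA_go (A B : String) : List (List String) → Int → Bool → Bool × (List (String × Int))
  | [], _, _ => (true, [])
  | t :: rest, i, seenA =>
    if t.contains B && !seenA then (false, [("violating_B_index", i)])
    else mpA_go A B rest (i + 1) (seenA || t.contains A)

def monitor_Precedence (A : String) (B : String) (trace : List (List String)) : Bool × (List (String × Int)) :=
  mpA_go A B trace 0 false

-- ===== PORT B =====
def monitor_Precedence_alt (A : String) (B : String) (trace : List (List String)) : Bool × (List (String × Int)) :=
  match trace.findIdx? (fun t => t.contains B) with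
  | none => (true, [])
  | some iB =>
    if trace.findIdx (fun t => t.contains A) < iB then (true, [])
    else (false, [("violating_B_index", (iB : Int))])

-- ===== PRECONDITION & SPEC =====
def Spec_monitor_Precedence (A : String) (B : String) (trace : List (List String)) (out : Bool × (List (String × Int))) : Prop := out = monitor_Precedence_alt A B trace
instance (A : String) (B : String) (trace : List (List String)) (out : Bool × (List (String × Int))) : Decidable (Spec_monitor_Precedence A B trace out) := by unfold Spec_monitor_Precedence; infer_instance

-- ===== CLAIM (what is proved, stated in full; the proofs are below) =====
def Claim_equal_monitor_Precedence : Prop := ∀ (A : String) (B : String) (trace : List (List String)), Dom_monitor_Precedence A B trace → Spec_monitor_Precedence A B trace (monitor_Precedence A B trace)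

-- ===== LEMMAS AND PROOFS =====

-- Once seen_A is true, A's loop can only return (true, []).
theorem mpA_go_true (A B : String) : ∀ (tr : List (List String)) (i : Int),
    mpA_go A B tr i true = (true, []) := by
  intro tr
  induction tr with
  | nil => intro i; rfl
  | cons t rest ih => intro i; simp [mpA_go, ih]

theorem mpA_eq_idx (A B : String) : ∀ (tr : List (List String)) (i : Int),
    mpA_go A B tr i false =
      (match tr.findIdx? (fun t => t.contains B) with
       | none => (true, [])
       | some iB =>
         if tr.findIdx (fun t => t.contains A) < iB then (true, [])
         else (false, [("violating_B_index", i + (iB : Int))])) := by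
  intro tr
  induction tr with
  | nil => intro i; rfl
  | cons t rest ih =>
    intro i
    by_cases hB : B ∈ t
    · simp [mpA_go, hB, List.findIdx?_cons, List.findIdx_cons]
    · by_cases hA : A ∈ t
      · simp [mpA_go, hB, hA, mpA_go_true, List.findIdx?_cons, List.findIdx_cons]
        cases rest.findIdx? (fun t => decide (B ∈ t)) with
        | none => simp
        | some iB => simp
      · simp [mpA_go, hB, hA, ih, List.findIdx?_cons, List.findIdx_cons]
        cases rest.findIdx? (fun t => decide (B ∈ t)) with
        | none => simp
        | some iB =>
          have h2 : i + 1 + (iB : Int) = i + ((iB + 1 : Nat) : Int) := by push_cast; ring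
          simp [h2]

-- ===== VERDICT =====
theorem monitor_Precedence_spec : Claim_equal_monitor_Precedence := by
  intro A B trace _
  unfold Spec_monitor_Precedence monitor_Precedence monitor_Precedence_alt
  rw [mpA_eq_idx]
  cases trace.findIdx? (fun t => t.contains B) <;> simp
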